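-- pv_equiv track=rewrite | github.com/osirisclark/DirectEmployers | TCS-tataconsultancyservices1.py | count_times
-- ===== SOURCE A (Python) =====
-- from math import gcd
--
-- def LCMULT(a):
--     lcm = a[0]
--     for i in a[1:]:
--         lcm = lcm*i//gcd(lcm, i)
--     return lcm
--
-- def count_times(a):
--     l = []
--     count = 0
--     for x in range(1, 1441):
--         if x % LCMULT(a) == 0:
--             count = + count+1
--             l.append(x)
--     return l, count
-- ===== SOURCE B (Python) =====
-- from math import gcd
--
-- def count_times(a):
--     # Compute the LCM once, then enumerate its multiples directly.
--     m = a[0]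
--     for v in a[1:]:
--         m = m * v // gcd(m, v)
--     m = abs(m)
--     l = [m * k for k in range(1, 1440 // m + 1)]
--     return l, len(l)
-- ===== Notes on version B (the rewrite author's own statement) =====
-- stated objective: faster
-- what changed: B computes the LCM once and directly enumerates its multiples up to 1440 (count = 1440//lcm), instead of recomputing the LCM inside a 1440-iteration trial loop.
import Mathlib
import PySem

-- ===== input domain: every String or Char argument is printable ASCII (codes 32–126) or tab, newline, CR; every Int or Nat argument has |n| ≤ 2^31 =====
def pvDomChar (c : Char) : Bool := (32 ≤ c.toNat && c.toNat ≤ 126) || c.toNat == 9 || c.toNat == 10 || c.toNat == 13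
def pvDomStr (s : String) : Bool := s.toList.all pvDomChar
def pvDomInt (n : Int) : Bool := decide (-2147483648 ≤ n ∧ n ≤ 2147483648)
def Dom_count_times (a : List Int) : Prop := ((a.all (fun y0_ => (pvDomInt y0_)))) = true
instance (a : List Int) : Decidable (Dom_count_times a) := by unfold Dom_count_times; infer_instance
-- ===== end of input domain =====

-- B computes the LCM once and enumerates its multiples directly (count = 1440 // |lcm|),
-- instead of recomputing the LCM inside a 1440-iteration trial loop (objective: faster).

-- ===== PORT A =====
-- a[0] raises IndexError on []; Pre_ excludes [], so the default 0 is never relevant.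
def pyLCMULT (a : List Int) : Int :=
  (PySem.List.slice a (some 1) none).foldl
    (fun lcm i => PySem.Int.floordiv (lcm * i) (Int.gcd lcm i))
    (PySem.List.pyGetD a 0 0)

def count_times (a : List Int) : List Int × Int :=
  (PySem.List.pyRange 1 1441).foldl
    (fun s x => if PySem.Int.mod x (pyLCMULT a) = 0 then (s.1 ++ [x], s.2 + 1) else s)
    (([] : List Int), (0 : Int))

-- ===== PORT B =====
def count_times_alt (a : List Int) : List Int × Int :=
  let m0 : Int := (PySem.List.slice a (some 1) none).foldl
    (fun m v => PySem.Int.floordiv (m * v) (Int.gcd m v))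
    (PySem.List.pyGetD a 0 0)
  let m : Int := |m0|
  let l : List Int := (PySem.List.pyRange 1 (PySem.Int.floordiv 1440 m + 1)).map (fun k => m * k)
  (l, (l.length : Int))

-- ===== PRECONDITION & SPEC =====
-- A raises IndexError on the empty list and ZeroDivisionError when 0 occurs in a
-- (the LCM becomes 0 and 'x % 0' / 'gcd(0,0)' divides by zero); those inputs are excluded.
def Pre_count_times (a : List Int) : Prop := a ≠ [] ∧ (0 : Int) ∉ a
instance (a : List Int) : Decidable (Pre_count_times a) := by unfold Pre_count_times; infer_instance
def pvWitness_count_times : List Int := [3, 4]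

def Spec_count_times (a : List Int) (out : List Int × Int) : Prop := out = count_times_alt a
instance (a : List Int) (out : List Int × Int) : Decidable (Spec_count_times a out) := by unfold Spec_count_times; infer_instance

-- ===== CLAIM (what is proved, stated in full; the proofs are below) =====
def Claim_equal_count_times : Prop :=
  ∀ (a : List Int), Dom_count_times a → Pre_count_times a → Spec_count_times a (count_times a)

-- ===== LEMMAS AND PROOFS =====

-- One LCM-loop step keeps the accumulator nonzero.
theorem lcm_step_ne_zero (s i : Int) (hs : s ≠ 0) (hi : i ≠ 0) :
    PySem.Int.floordiv (s * i) (Int.gcd s i) ≠ 0 := by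
  have hg : (Int.gcd s i : Int) ≠ 0 := by
    exact_mod_cast fun h => hs (by simpa using (Int.gcd_eq_zero_iff.mp (by exact_mod_cast h)).1)
  obtain ⟨q, hq⟩ : (Int.gcd s i : Int) ∣ s * i :=
    dvd_mul_of_dvd_left (Int.gcd_dvd_left s i) i
  have : PySem.Int.floordiv (s * i) (Int.gcd s i) = q := by
    simp [PySem.Int.floordiv, hq, Int.mul_fdiv_cancel_left _ hg]
  rw [this]
  intro h0
  exact mul_ne_zero hs hi (by rw [hq, h0, mul_zero])

theorem foldl_lcm_ne_zero (l : List Int) (hl : ∀ i ∈ l, i ≠ 0) :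
    ∀ s : Int, s ≠ 0 →
      l.foldl (fun lcm i => PySem.Int.floordiv (lcm * i) (Int.gcd lcm i)) s ≠ 0 := by
  induction l with
  | nil => intro s hs; simpa using hs
  | cons x xs ih =>
    intro s hs
    exact ih (fun i hi => hl i (List.mem_cons_of_mem _ hi))
      _ (lcm_step_ne_zero s x hs (hl x (List.mem_cons_self)))

-- Under Pre_, the computed LCM is nonzero.
theorem pyLCMULT_ne_zero (a : List Int) (h : Pre_count_times a) : pyLCMULT a ≠ 0 := by
  obtain ⟨hne, h0⟩ := h
  obtain ⟨x, xs, rfl⟩ := List.exists_cons_of_ne_nil hne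
  unfold pyLCMULT
  rw [PySem.List.slice_from_one]
  have hx : x ≠ 0 := fun h => h0 (h ▸ List.mem_cons_self)
  have hhd : PySem.List.pyGetD (x :: xs) 0 0 = x := by simp [PySem.List.pyGetD, PySem.List.pyIdx?, PySem.List.pyGet?]
  rw [hhd]
  exact foldl_lcm_ne_zero xs (fun i hi h => h0 (h ▸ List.mem_cons_of_mem _ hi)) x hx

-- Multiples of a positive m among 1..N, as a filter, are the direct enumeration.
theorem filter_dvd_pyRange (m : Nat) (_hm : 0 < m) (N : Nat) :
    (PySem.List.pyRange 1 ((N : Int) + 1)).filter (fun x => decide ((m : Int) ∣ x))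
      = (PySem.List.pyRange 1 ((N / m : Nat) + 1)).map (fun k => (m : Int) * k) := by
  induction N with
  | zero =>
    simp [PySem.List.pyRange_one_eq_nil (by omega : (1:Int) ≤ 1), Nat.zero_div]
  | succ N ih =>
    have h1 : (((N + 1 : Nat)) : Int) + 1 = ((N : Int) + 1) + 1 := by push_cast; ring
    rw [h1, PySem.List.pyRange_one_succ_right (by omega : (1:Int) ≤ (N : Int) + 1),
      List.filter_append, ih, Nat.succ_div]
    by_cases hd : m ∣ N + 1
    · have hq : (N + 1) / m = N / m + 1 := by rw [Nat.succ_div, if_pos hd]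
      have e : m * (N / m + 1) = N + 1 := by
        have := Nat.mul_div_cancel' hd; rw [hq] at this; exact this
      have hdz : ((m : Int) ∣ (N : Int) + 1) := by
        exact_mod_cast (Int.natCast_dvd_natCast.mpr hd : (m:Int) ∣ ((N+1:Nat):Int))
      rw [if_pos hd]
      have h2 : ((N / m + 1 : Nat) : Int) + 1 = ((N / m : Nat) : Int) + 1 + 1 := by push_cast; ring
      rw [h2, PySem.List.pyRange_one_succ_right (by have h0 := Int.natCast_nonneg (N / m); omega : (1:Int) ≤ ((N / m : Nat) : Int) + 1),
        List.map_append]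
      congr 1
      have e' : (m : Int) * (((N / m : Nat) : Int) + 1) = (N : Int) + 1 := by exact_mod_cast e
      have hf : List.filter (fun x => decide ((m : Int) ∣ x)) [(N : Int) + 1] = [(N : Int) + 1] := by
        simp [hdz]
      rw [hf, List.map_cons, List.map_nil, e']
    · have hdz : ¬ ((m : Int) ∣ (N : Int) + 1) := by
        intro h
        exact hd (by exact_mod_cast (h : (m:Int) ∣ ((N+1:Nat):Int)))
      rw [if_neg hd]
      simp [hdz]

-- A's count loop equals the length of the filtered list.
theorem foldl_count_ite (p : Int → Prop) [DecidablePred p] (l : List Int) :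
    ∀ n : Int, l.foldl (fun c x => if p x then c + 1 else c) n
      = n + ((l.filter fun x => decide (p x)).length : Int) := by
  induction l with
  | nil => intro n; simp
  | cons x xs ih =>
    intro n
    by_cases h : p x <;> simp [h, ih] <;> ring

-- A loop over a pair of accumulators is two loops.
theorem foldl_pair_split (c : Int → Prop) [DecidablePred c] (l : List Int) :
    ∀ (acc : List Int) (n : Int),
      l.foldl (fun (s : List Int × Int) x => if c x then (s.1 ++ [x], s.2 + 1) else s) (acc, n)
        = (l.foldl (fun t x => if c x then t ++ [x] else t) acc,
           l.foldl (fun t x => if c x then t + 1 else t) n) := by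
  induction l with
  | nil => intro acc n; rfl
  | cons x xs ih =>
    intro acc n
    by_cases h : c x <;> simp [h, ih]

theorem count_times_spec' (a : List Int) (h : Pre_count_times a) :
    count_times a = count_times_alt a := by
  have hL : pyLCMULT a ≠ 0 := pyLCMULT_ne_zero a h
  set L := pyLCMULT a with hLdef
  set m : Nat := L.natAbs with hmdef
  have hm : 0 < m := Int.natAbs_pos.mpr hL
  -- predicates agree
  have hpred : (fun x => decide (PySem.Int.mod x L = 0)) = (fun x => decide ((m : Int) ∣ x)) := by
    funext x
    simp only [PySem.Int.mod_eq_zero_iff_dvd, hmdef, Int.natAbs_dvd]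
  -- split A's paired loop
  have hA : count_times a =
      (((PySem.List.pyRange 1 1441).filter (fun x => decide ((m : Int) ∣ x))),
       (((PySem.List.pyRange 1 1441).filter (fun x => decide ((m : Int) ∣ x))).length : Int)) := by
    unfold count_times
    rw [← hLdef, foldl_pair_split (fun x => PySem.Int.mod x L = 0)]
    rw [PySem.List.foldl_append_ite_eq_filter (fun x => PySem.Int.mod x L = 0)]
    rw [foldl_count_ite (fun x => PySem.Int.mod x L = 0)]
    rw [show ((fun x => decide (PySem.Int.mod x L = 0))) = (fun x => decide ((m:Int) ∣ x)) from hpred]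
    simp only [List.nil_append, zero_add]
  have hdiv : PySem.Int.floordiv 1440 (m : Int) = ((1440 / m : Nat) : Int) := by
    rw [PySem.Int.floordiv_eq_ediv_of_pos (by exact_mod_cast hm)]
    exact_mod_cast (Int.natCast_div 1440 m).symm
  have habs : |L| = (m : Int) := Int.abs_eq_natAbs L
  have hB : count_times_alt a =
      (((PySem.List.pyRange 1 (((1440 / m : Nat) : Int) + 1)).map (fun k => (m : Int) * k)),
       (((PySem.List.pyRange 1 (((1440 / m : Nat) : Int) + 1)).map (fun k => (m : Int) * k)).length : Int)) := by
    unfold count_times_alt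
    have hm0 : (PySem.List.slice a (some 1) none).foldl
        (fun mm v => PySem.Int.floordiv (mm * v) (Int.gcd mm v))
        (PySem.List.pyGetD a 0 0) = L := by rw [hLdef]; rfl
    simp only [hm0, habs, hdiv]
  rw [hA, hB]
  have hrange : (1441 : Int) = ((1440 : Nat) : Int) + 1 := by norm_num
  rw [hrange, filter_dvd_pyRange m hm 1440]

-- ===== VERDICT (by name: the statement is the Claim_ definition above) =====
theorem count_times_spec : Claim_equal_count_times := by
  intro a _ hpre
  exact count_times_spec' a hpre
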